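-- pv_equiv track=rewrite | github.com/AnawinA/IT_encoder | bundle.py | number_cut_encode
-- ===== SOURCE A (Python) =====
-- def number_cut_encode(num: str) -> list[int]:
--     """Number Factory"""
--     i_number = int(num)
--     cut = 10
--     l = []
--     while i_number > 0:
--         cut_number = i_number % cut
--         if cut_number:
--             l.append(cut_number)
--         i_number -= cut_number
--         cut *= 10
--     return l
-- ===== SOURCE B (Python) =====
-- def number_cut_encode(num: str) -> list[int]:
--     """Number Factory"""
--     n = int(num)
--     if n <= 0:
--         return []
--     return [(ord(ch) - 48) * 10 ** i
--             for i, ch in enumerate(reversed(str(n)))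
--             if ch != '0']
-- ===== Notes on version B (the rewrite author's own statement) =====
-- stated objective: idiomatic
-- what changed: Replaces the running-cut/modulo-and-subtract loop over a growing modulus with a comprehension over the decimal string of n: each nonzero digit of reversed(str(n)) contributes digit*10**i.
import Mathlib
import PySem

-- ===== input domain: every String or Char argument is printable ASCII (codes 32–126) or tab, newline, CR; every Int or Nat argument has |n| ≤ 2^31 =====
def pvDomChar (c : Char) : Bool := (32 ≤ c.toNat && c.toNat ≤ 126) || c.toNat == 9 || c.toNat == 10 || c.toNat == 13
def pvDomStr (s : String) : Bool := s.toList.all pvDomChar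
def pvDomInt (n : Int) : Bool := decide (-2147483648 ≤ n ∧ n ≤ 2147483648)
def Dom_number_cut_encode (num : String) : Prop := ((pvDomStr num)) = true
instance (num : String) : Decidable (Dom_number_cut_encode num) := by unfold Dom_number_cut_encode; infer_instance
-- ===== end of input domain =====

-- B replaces A's running-cut modulo-and-subtract loop with a comprehension over the
-- decimal string of n (idiomatic; not measured faster).

-- ===== PORT A =====
-- the while loop of A, state (i_number, cut, l); the fuel argument only makes the
-- recursion structural and is never exhausted (the loop runs at most one step per
-- decimal digit of i_number, and fuel starts at n.toNat + 1)
def ncLoopA : Nat → Int → Int → List Int → List Int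
  | 0, _, _, l => l
  | fuel + 1, i, cut, l =>
    if 0 < i then
      let c := PySem.Int.mod i cut
      ncLoopA fuel (i - c) (cut * 10) (if c ≠ 0 then l ++ [c] else l)
    else l

def number_cut_encode (num : String) : List Int :=
  match PySem.Int.ofStr? num with
  | none => []        -- int(num) raises ValueError here: excluded by Pre_
  | some n => ncLoopA (n.toNat + 1) n 10 []

-- ===== PORT B =====
def number_cut_encode_alt (num : String) : List Int :=
  match PySem.Int.ofStr? num with
  | none => []        -- int(num) raises ValueError here: excluded by Pre_
  | some n =>
    if n ≤ 0 then []
    else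
      -- [(ord(ch) - 48) * 10 ** i for i, ch in enumerate(reversed(str(n))) if ch != '0']
      (PySem.List.enumerate (PySem.Int.toStr n).toList.reverse).foldl
        (fun acc p =>
          if p.2 ≠ '0' then acc ++ [((p.2.toNat : Int) - 48) * 10 ^ p.1.toNat] else acc) []

-- ===== PRECONDITION & SPEC =====
-- Pre_ excludes exactly the strings on which int(num) raises ValueError (A returns on all others).
def Pre_number_cut_encode (num : String) : Prop := (PySem.Int.ofStr? num).isSome = true
instance (num : String) : Decidable (Pre_number_cut_encode num) := by
  unfold Pre_number_cut_encode; infer_instance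

def pvWitness_number_cut_encode : String := "1203"

def Spec_number_cut_encode (num : String) (out : List Int) : Prop := out = number_cut_encode_alt num
instance (num : String) (out : List Int) : Decidable (Spec_number_cut_encode num out) := by
  unfold Spec_number_cut_encode; infer_instance

-- ===== CLAIM (what is proved, stated in full; the proofs are below) =====
def Claim_equal_number_cut_encode : Prop := ∀ (num : String), Dom_number_cut_encode num → Pre_number_cut_encode num → Spec_number_cut_encode num (number_cut_encode num)

-- ===== LEMMAS AND PROOFS =====

-- the value both programs compute: the nonzero digits of ds (least significant first,
-- place offset k) as place values
def ncSpec : List Nat → Nat → List Int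
  | [], _ => []
  | d :: ds, k => (if d ≠ 0 then [(d : Int) * 10 ^ k] else []) ++ ncSpec ds (k + 1)

theorem ncLoopA_zero (fuel : Nat) (cut : Int) (l : List Int) :
    ncLoopA fuel 0 cut l = l := by
  cases fuel <;> simp [ncLoopA]

theorem ncLoopA_eq (fuel : Nat) : ∀ (m k : Nat) (acc : List Int), 0 < m → m ≤ fuel →
    ncLoopA fuel ((m : Int) * 10 ^ k) (10 ^ (k + 1)) acc = acc ++ ncSpec (Nat.digits 10 m) k := by
  induction fuel with
  | zero => intro m k acc hm hle; omega
  | succ fuel ih =>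
    intro m k acc hm hle
    have hipos : (0 : Int) < (m : Int) * 10 ^ k := by positivity
    have hmod : PySem.Int.mod ((m : Int) * 10 ^ k) (10 ^ (k + 1)) =
        ((m % 10 * 10 ^ k : Nat) : Int) := by
      have h1 : ((m : Int) * 10 ^ k) = ((m * 10 ^ k : Nat) : Int) := by push_cast; ring
      have h2 : ((10 : Int) ^ (k + 1)) = ((10 ^ (k + 1) : Nat) : Int) := by push_cast; ring
      rw [PySem.Int.mod, h1, h2, Int.fmod_eq_emod,
        if_pos (Or.inl (by positivity)), add_zero, ← Int.natCast_mod]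
      congr 1
      rw [pow_succ, Nat.mul_comm ((10 : Nat) ^ k) 10]
      exact Nat.mul_mod_mul_right _ _ _
    have hle' : m % 10 * 10 ^ k ≤ m * 10 ^ k := Nat.mul_le_mul_right _ (Nat.mod_le m 10)
    have hnat : m * 10 ^ k - m % 10 * 10 ^ k = m / 10 * 10 ^ (k + 1) := by
      have h4 : m - m % 10 = 10 * (m / 10) := by omega
      rw [← Nat.sub_mul, h4, pow_succ]; ring
    have hsub : (m : Int) * 10 ^ k - ((m % 10 * 10 ^ k : Nat) : Int) =
        ((m / 10 : Nat) : Int) * 10 ^ (k + 1) := by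
      rw [show ((m : Int) * 10 ^ k) = ((m * 10 ^ k : Nat) : Int) from by push_cast; ring,
        ← Nat.cast_sub hle', hnat]
      push_cast; ring
    have hdig : Nat.digits 10 m = m % 10 :: Nat.digits 10 (m / 10) :=
      Nat.digits_def' (by norm_num) hm
    have hcne : (((m % 10 * 10 ^ k : Nat) : Int) ≠ 0) ↔ (m % 10 ≠ 0) := by
      constructor
      · intro h hz; apply h; simp [hz]
      · intro h hz
        have : m % 10 * 10 ^ k = 0 := by exact_mod_cast hz
        rcases Nat.mul_eq_zero.mp this with h' | h'
        · exact h h'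
        · exact absurd h' (by positivity)
    simp only [ncLoopA, hipos, if_pos, hmod, hsub]
    by_cases hq : m / 10 = 0
    · have hmlt : m < 10 := Nat.lt_of_div_eq_zero (by norm_num) hq
      have hmm : m % 10 = m := Nat.mod_eq_of_lt hmlt
      rw [hq]
      simp only [Nat.cast_zero, zero_mul, ncLoopA_zero]
      rw [hdig, hq]
      simp only [Nat.digits_zero, ncSpec]
      have : m % 10 ≠ 0 := by omega
      rw [if_pos (hcne.mpr this), if_pos this]
      simp [hmm]
    · have hqpos : 0 < m / 10 := Nat.pos_of_ne_zero hq
      have hqle : m / 10 ≤ fuel := by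
        have : m / 10 < m := Nat.div_lt_self hm (by norm_num)
        omega
      have hcut : (10 : Int) ^ (k + 1) * 10 = 10 ^ (k + 1 + 1) := by ring
      rw [hcut, ih (m / 10) (k + 1) _ hqpos hqle, hdig]
      simp only [ncSpec]
      by_cases hz : m % 10 = 0
      · rw [if_neg (by simp [hz]), if_neg (by simp [hz])]
        simp
      · rw [if_pos (hcne.mpr hz), if_pos hz]
        simp only [List.append_assoc, List.singleton_append]
        push_cast; ring_nf
    
theorem toDigitsCore_eq (fuel : Nat) : ∀ (m : Nat) (ds : List Char), 0 < m → m ≤ fuel →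
    Nat.toDigitsCore 10 fuel m ds = ((Nat.digits 10 m).map Nat.digitChar).reverse ++ ds := by
  induction fuel with
  | zero => intro m ds hm hle; omega
  | succ fuel ih =>
    intro m ds hm hle
    have hdig : Nat.digits 10 m = m % 10 :: Nat.digits 10 (m / 10) :=
      Nat.digits_def' (by norm_num) hm
    rw [Nat.toDigitsCore]
    by_cases hq : m / 10 = 0
    · rw [if_pos hq, hdig, hq]
      simp
    · rw [if_neg hq]
      have hqpos : 0 < m / 10 := Nat.pos_of_ne_zero hq
      have hqle : m / 10 ≤ fuel := by
        have : m / 10 < m := Nat.div_lt_self hm (by norm_num)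
        omega
      rw [ih (m / 10) _ hqpos hqle, hdig]
      simp

theorem digitChar_ne_zero_iff {d : Nat} (hd : d < 10) : (Nat.digitChar d ≠ '0') ↔ d ≠ 0 := by
  interval_cases d <;> decide

theorem digitChar_toNat {d : Nat} (hd : d < 10) : ((Nat.digitChar d).toNat : Int) - 48 = d := by
  interval_cases d <;> decide

theorem foldB_eq : ∀ (ds : List Nat) (k : Nat) (acc : List Int), (∀ d ∈ ds, d < 10) →
    (PySem.List.enumerate (ds.map Nat.digitChar) (k : Int)).foldl
      (fun acc p =>
        if p.2 ≠ '0' then acc ++ [((p.2.toNat : Int) - 48) * 10 ^ p.1.toNat] else acc) acc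
    = acc ++ ncSpec ds k := by
  intro ds
  induction ds with
  | nil => intro k acc _; simp [PySem.List.enumerate_nil, ncSpec]
  | cons d ds ih =>
    intro k acc hlt
    have hd : d < 10 := hlt d (by simp)
    have hds : ∀ x ∈ ds, x < 10 := fun x hx => hlt x (by simp [hx])
    have hsucc : ((k : Int) + 1) = ((k + 1 : Nat) : Int) := by push_cast; ring
    rw [List.map_cons, PySem.List.enumerate_cons, List.foldl_cons, hsucc, ih (k + 1) _ hds]
    simp only [ncSpec]
    by_cases hz : d = 0
    · rw [if_neg (by subst hz; decide), if_neg (by simp [hz])]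
      simp
    · rw [if_pos ((digitChar_ne_zero_iff hd).mpr hz), if_pos hz]
      simp only [List.append_assoc, List.singleton_append]
      rw [digitChar_toNat hd]
      simp

theorem number_cut_encode_spec : Claim_equal_number_cut_encode := by
  intro num _ hpre
  unfold Pre_number_cut_encode at hpre
  unfold Spec_number_cut_encode number_cut_encode number_cut_encode_alt
  cases h : PySem.Int.ofStr? num with
  | none => simp [h] at hpre
  | some n =>
    dsimp only
    by_cases hn : n ≤ 0
    · have : ¬ (0 : Int) < n := by omega
      rw [if_pos hn]
      simp [ncLoopA, this]
    · rw [if_neg hn]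
      have hn' : 0 < n := by omega
      have hm : 0 < n.toNat := by omega
      -- A's side
      have hA : ncLoopA (n.toNat + 1) n 10 [] = ncSpec (Nat.digits 10 n.toNat) 0 := by
        have h1 : n = ((n.toNat : Nat) : Int) * 10 ^ (0 : Nat) := by
          simp [Int.toNat_of_nonneg (by omega : (0:Int) ≤ n)]
        have h2 : (10 : Int) = 10 ^ (0 + 1) := by norm_num
        calc ncLoopA (n.toNat + 1) n 10 []
            = ncLoopA (n.toNat + 1) (((n.toNat : Nat) : Int) * 10 ^ (0 : Nat)) (10 ^ (0 + 1)) [] := by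
              rw [← h1, ← h2]
          _ = [] ++ ncSpec (Nat.digits 10 n.toNat) 0 := ncLoopA_eq _ _ _ _ hm (by omega)
          _ = ncSpec (Nat.digits 10 n.toNat) 0 := by simp
      -- B's side
      have hchars : (PySem.Int.toStr n).toList.reverse = (Nat.digits 10 n.toNat).map Nat.digitChar := by
        rw [PySem.Int.toList_toStr]
        show (PySem.Int.toChars n).reverse = _
        rw [PySem.Int.toChars, if_neg (by omega : ¬ n < 0), Nat.toDigits,
          toDigitsCore_eq _ _ _ hm (by omega)]
        simp
      have hB : (PySem.List.enumerate (PySem.Int.toStr n).toList.reverse).foldl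
            (fun acc p =>
              if p.2 ≠ '0' then acc ++ [((p.2.toNat : Int) - 48) * 10 ^ p.1.toNat] else acc) []
          = ncSpec (Nat.digits 10 n.toNat) 0 := by
        rw [hchars]
        have hlt : ∀ d ∈ Nat.digits 10 n.toNat, d < 10 :=
          fun d hd => Nat.digits_lt_base (by norm_num) hd
        have h0 : ((0 : Nat) : Int) = 0 := by norm_num
        calc (PySem.List.enumerate ((Nat.digits 10 n.toNat).map Nat.digitChar) 0).foldl _ []
            = (PySem.List.enumerate ((Nat.digits 10 n.toNat).map Nat.digitChar) ((0 : Nat) : Int)).foldl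
              (fun acc p =>
                if p.2 ≠ '0' then acc ++ [((p.2.toNat : Int) - 48) * 10 ^ p.1.toNat] else acc) [] := by
              rw [h0]
          _ = [] ++ ncSpec (Nat.digits 10 n.toNat) 0 := foldB_eq _ 0 [] hlt
          _ = ncSpec (Nat.digits 10 n.toNat) 0 := by simp
      rw [hA, hB]
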